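-- pv_equiv track=rewrite | github.com/yuutom/BasicAlgorithms | Examples/Q021_Come_Back_in_One_Piece.py | calc
-- ===== SOURCE A (Python) =====
-- def calc(label, group):
--     l = [0] * label
--     # それぞれの group に何個頂点があるか
--     for i in group:
--         l[i] += 1
--     ans = 0
--     for j in l:
--         ans += j * (j-1) // 2
--     return ans
-- ===== SOURCE B (Python) =====
-- def calc(label, group):
--     seen = [0] * label
--     ans = 0
--     for i in group:
--         ans += seen[i]
--         seen[i] += 1
--     return ans
-- ===== Notes on version B (the rewrite author's own statement) =====
-- stated objective: simpler
-- what changed: B fuses the two passes into one loop that accumulates the pair count incrementally (ans += seen[i] before incrementing), eliminating the count array's second pass and the closed-form j*(j-1)//2.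
import Mathlib
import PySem

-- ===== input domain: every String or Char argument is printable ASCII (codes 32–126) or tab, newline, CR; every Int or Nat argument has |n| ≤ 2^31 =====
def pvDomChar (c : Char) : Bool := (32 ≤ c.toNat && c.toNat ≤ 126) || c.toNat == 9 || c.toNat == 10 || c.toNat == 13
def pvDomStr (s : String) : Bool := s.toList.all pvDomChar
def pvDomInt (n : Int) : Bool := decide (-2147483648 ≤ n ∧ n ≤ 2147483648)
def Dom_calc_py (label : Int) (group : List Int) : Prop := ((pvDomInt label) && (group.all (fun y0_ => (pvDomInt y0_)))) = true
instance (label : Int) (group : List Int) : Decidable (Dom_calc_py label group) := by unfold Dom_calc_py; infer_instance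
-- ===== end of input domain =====

-- B fuses A's two passes into one loop that accumulates the pair count incrementally
-- (ans += seen[i] before incrementing seen[i]) instead of totaling counts and applying j*(j-1)//2 (objective: simpler).

-- ===== PORT A =====
def calc_py (label : Int) (group : List Int) : Int :=
  let l := group.foldl
    (fun l i => PySem.List.pySetD l i (PySem.List.pyGetD l i 0 + 1))
    (PySem.List.pyRepeat [(0 : Int)] label)
  l.foldl (fun ans j => ans + PySem.Int.floordiv (j * (j - 1)) 2) 0

-- ===== PORT B =====
def calc_py_alt (label : Int) (group : List Int) : Int :=
  (group.foldl
    (fun st i =>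
      (PySem.List.pySetD st.1 i (PySem.List.pyGetD st.1 i 0 + 1),
       st.2 + PySem.List.pyGetD st.1 i 0))
    (PySem.List.pyRepeat [(0 : Int)] label, 0)).2

-- ===== PRECONDITION & SPEC =====
-- Pre_ excludes exactly the inputs on which the Python raises IndexError:
-- some group label outside [-label, label) (including every nonempty group when label ≤ 0).
def Pre_calc_py (label : Int) (group : List Int) : Prop :=
  ∀ i ∈ group, PySem.Raise.InRange label.toNat i
instance (label : Int) (group : List Int) : Decidable (Pre_calc_py label group) := by
  unfold Pre_calc_py; infer_instance
def pvWitness_calc_py : Int × List Int := (3, [0, 1, 0, 2, -1])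

def Spec_calc_py (label : Int) (group : List Int) (out : Int) : Prop := out = calc_py_alt label group
instance (label : Int) (group : List Int) (out : Int) : Decidable (Spec_calc_py label group out) := by
  unfold Spec_calc_py; infer_instance

-- ===== CLAIM (what is proved, stated in full; the proofs are below) =====
def Claim_equal_calc_py : Prop := ∀ (label : Int) (group : List Int), Dom_calc_py label group → Pre_calc_py label group → Spec_calc_py label group (calc_py label group)

-- ===== LEMMAS AND PROOFS =====

-- C(j, 2) as A computes it
def pvC (j : Int) : Int := PySem.Int.floordiv (j * (j - 1)) 2

def pvSumC (l : List Int) : Int := (l.map pvC).sum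

theorem pvC_succ (g : Int) : pvC (g + 1) = pvC g + g := by
  obtain ⟨k, hk⟩ := Int.even_mul_pred_self g
  have hk2 : g * (g - 1) = 2 * k := by omega
  have hk3 : (g + 1) * (g + 1 - 1) = 2 * (k + g) := by linear_combination hk2
  unfold pvC
  rw [PySem.Int.floordiv_eq_ediv_of_pos (by norm_num), PySem.Int.floordiv_eq_ediv_of_pos (by norm_num),
      hk2, hk3, Int.mul_ediv_cancel_left _ (by norm_num), Int.mul_ediv_cancel_left _ (by norm_num)]

theorem pySetD_neg_natCast' (l : List Int) (k : Nat) (hk : 0 < k) (hk2 : k ≤ l.length) (v : Int) :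
    PySem.List.pySetD l (-(k : Int)) v = l.set (l.length - k) v := by
  unfold PySem.List.pySetD PySem.List.pySet? PySem.List.pyIdx?
  rw [if_neg (by omega), if_pos (by omega)]
  simp

-- normalize a Python index (possibly negative) to a Nat index for both get and set
theorem pv_norm (l : List Int) (i : Int) (h : PySem.Raise.InRange l.length i) :
    ∃ n : Nat, ∃ hn : n < l.length, PySem.List.pyGetD l i 0 = l[n] ∧
      ∀ v : Int, PySem.List.pySetD l i v = l.set n v := by
  simp only [PySem.Raise.InRange] at h
  by_cases h0 : 0 ≤ i
  · refine ⟨i.toNat, by omega, ?_, fun v => PySem.List.pySetD_of_nonneg l v h0⟩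
    exact PySem.List.pyGetD_eq_getElem l 0 h0 (by omega)
  · obtain ⟨k, rfl⟩ : ∃ k : Nat, i = -(k : Int) := ⟨(-i).toNat, by omega⟩
    refine ⟨l.length - k, by omega, ?_, fun v => ?_⟩
    · exact PySem.List.pyGetD_neg_natCast l k 0 (by omega) (by omega)
    · exact pySetD_neg_natCast' l k (by omega) (by omega) v

theorem pvSumC_set (l : List Int) (n : Nat) (hn : n < l.length) (v : Int) :
    pvSumC (l.set n v) = pvSumC l - pvC l[n] + pvC v := by
  unfold pvSumC
  rw [List.map_set, List.sum_set]
  have hlen : n < (l.map pvC).length := by simpa using hn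
  have hdecomp : (l.map pvC).sum
      = ((l.map pvC).take n).sum + pvC l[n] + ((l.map pvC).drop (n + 1)).sum := by
    rw [← List.sum_take_add_sum_drop (l.map pvC) n, ← List.getElem_cons_drop hlen]
    simp [List.sum_cons]
    ring
  rw [if_pos hlen]
  omega

theorem pv_loop (group : List Int) : ∀ (l : List Int) (ans : Int),
    (∀ i ∈ group, PySem.Raise.InRange l.length i) →
    (group.foldl
        (fun st i =>
          (PySem.List.pySetD st.1 i (PySem.List.pyGetD st.1 i 0 + 1),
           st.2 + PySem.List.pyGetD st.1 i 0)) (l, ans)).2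
      = ans + pvSumC (group.foldl
          (fun l i => PySem.List.pySetD l i (PySem.List.pyGetD l i 0 + 1)) l) - pvSumC l := by
  induction group with
  | nil => intro l ans _; simp
  | cons i rest ih =>
    intro l ans h
    obtain ⟨n, hn, hget, hset⟩ := pv_norm l i (h i (by simp))
    simp only [List.foldl_cons, hset, hget]
    rw [ih (l.set n (l[n] + 1)) (ans + l[n])
        (fun j hj => by simpa using h j (List.mem_cons_of_mem _ hj))]
    have := pvSumC_set l n hn (l[n] + 1)
    have := pvC_succ (l[n])
    omega

theorem pvSumC_replicate (m : Nat) : pvSumC (List.replicate m 0) = 0 := by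
  have h0 : pvC 0 = 0 := by decide
  simp [pvSumC, List.map_replicate, h0, List.sum_replicate]

theorem pvWitness_ok : Dom_calc_py pvWitness_calc_py.1 pvWitness_calc_py.2 ∧ Pre_calc_py pvWitness_calc_py.1 pvWitness_calc_py.2 := by
  constructor <;> decide

-- ===== VERDICT (by name: the statement is the Claim_ definition above) =====
theorem calc_py_spec : Claim_equal_calc_py := by
  intro label group _ hpre
  unfold Spec_calc_py calc_py calc_py_alt
  rw [PySem.List.pyRepeat_singleton]
  have hlen : (List.replicate label.toNat (0 : Int)).length = label.toNat := by simp
  rw [pv_loop group (List.replicate label.toNat 0) 0 (fun i hi => by rw [hlen]; exact hpre i hi)]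
  rw [PySem.List.foldl_add _ (fun j => PySem.Int.floordiv (j * (j - 1)) 2) 0]
  rw [pvSumC_replicate]
  have hpc : (fun (j : Int) => PySem.Int.floordiv (j * (j - 1)) 2) = pvC := rfl
  rw [hpc]
  simp [pvSumC]
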